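-- pv_equiv track=rewrite | github.com/quic/ai-hub-models | qai_hub_models/utils/model_card.py | chipset_marketting_name
-- ===== SOURCE A (Python) =====
-- def chipset_marketting_name(chipset) -> str:
--     """Sanitize chip name to match marketting."""
--     chip = [word.capitalize() for word in chipset.split("-")]
--     details_to_remove = []
--     for i in range(len(chip)):
--         if chip[i] == "8gen3":
--             chip[i] = "8 Gen 3"
--         if chip[i] == "8gen2":
--             chip[i] = "8 Gen 2"
--         elif chip[i] == "8gen1":
--             chip[i] = "8 Gen 1"
--         elif chip[i] == "Snapdragon":
--             # Marketing name for Qualcomm Snapdragon is Snapdragon®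
--             chip[i] = "Snapdragon®"
--         elif chip[i] == "Qualcomm":
--             details_to_remove.append(chip[i])
--
--     for detail in details_to_remove:
--         chip.remove(detail)
--     return " ".join(chip)
-- ===== SOURCE B (Python) =====
-- def chipset_marketting_name(chipset) -> str:
--     """Sanitize chip name to match marketting."""
--     repl = {
--         "8gen3": "8 Gen 3",
--         "8gen2": "8 Gen 2",
--         "8gen1": "8 Gen 1",
--         "Snapdragon": "Snapdragon\u00ae",
--     }
--     out = []
--     word = ""
--     for ch in chipset:
--         if ch == "-":
--             if word != "Qualcomm":
--                 out.append(repl.get(word, word))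
--             word = ""
--         else:
--             word += ch.lower() if word else ch.upper()
--     if word != "Qualcomm":
--         out.append(repl.get(word, word))
--     return " ".join(out)
-- ===== Notes on version B (the rewrite author's own statement) =====
-- stated objective: alternative
-- what changed: Replaces A's split-into-words, capitalize-each, mutate-by-index if/elif loop and second remove() pass by a single character-level scan of the input that builds each word (capitalizing as it goes), and on each '-' emits it through a replacement table unless it is 'Qualcomm'.
import Mathlib
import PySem

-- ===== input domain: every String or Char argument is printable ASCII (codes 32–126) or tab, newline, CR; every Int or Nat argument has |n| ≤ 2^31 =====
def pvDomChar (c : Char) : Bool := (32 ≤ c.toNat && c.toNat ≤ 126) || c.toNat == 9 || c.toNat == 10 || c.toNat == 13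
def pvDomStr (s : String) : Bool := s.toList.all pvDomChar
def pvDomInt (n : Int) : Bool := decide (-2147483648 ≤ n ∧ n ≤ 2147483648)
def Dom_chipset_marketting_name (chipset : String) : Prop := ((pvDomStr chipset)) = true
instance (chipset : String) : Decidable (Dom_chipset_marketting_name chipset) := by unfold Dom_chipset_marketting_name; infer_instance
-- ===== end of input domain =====

-- B replaces A's split / capitalize / index-mutation loop / second remove() pass by ONE character-level
-- scan of the input that builds each word (capitalizing as it goes) and emits it on each '-' (objective: simpler).

-- ===== PORT A =====
-- Python str.capitalize (first char upper, rest lower; exact on ASCII via PySem case primitives)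
def capChars (t : List Char) : List Char :=
  match t with
  | [] => []
  | c :: r => PySem.Chars.upperChar c :: PySem.Chars.lower r

def pyCapitalize (s : String) : String := String.ofList (capChars s.toList)

-- the body of A's index loop: the (possibly replaced) word, plus the detail appended (if any)
def pvStepA (w : String) : String × Option String :=
  let w := if w == "8gen3" then "8 Gen 3" else w
  if w == "8gen2" then ("8 Gen 2", none)
  else if w == "8gen1" then ("8 Gen 1", none)
  else if w == "Snapdragon" then ("Snapdragon®", none)
  else if w == "Qualcomm" then (w, some w)
  else (w, none)

def pvLoopA : List String → List String × List String
  | [] => ([], [])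
  | w :: rest =>
    let p := pvStepA w
    let q := pvLoopA rest
    (p.1 :: q.1, match p.2 with | some x => x :: q.2 | none => q.2)

-- chip.remove(detail); the detail always occurs in chip, so remove? never returns none (getD never takes its default)
def pvRemove (l : List String) (d : String) : List String := (PySem.List.remove? l d).getD l

def chipset_marketting_name (chipset : String) : String :=
  -- split? "-" is exact for the nonempty literal separator (never none)
  let chip := ((PySem.Str.split? chipset "-").getD []).map pyCapitalize
  let r := pvLoopA chip
  PySem.Str.join " " (r.2.foldl pvRemove r.1)

-- ===== PORT B =====
def pvRepl : PySem.Dict String String :=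
  PySem.Dict.ofList [("8gen3", "8 Gen 3"), ("8gen2", "8 Gen 2"), ("8gen1", "8 Gen 1"), ("Snapdragon", "Snapdragon®")]

-- Source B's word emission: append repl.get(word, word) unless the word is "Qualcomm"
def pvEmit (out : List String) (word : List Char) : List String :=
  let w := String.ofList word
  if w == "Qualcomm" then out else out ++ [PySem.Dict.getD pvRepl w w]

-- Source B's for loop: state (out, word), one character at a time; capitalization done as the word is built
def pvScanB : List String → List Char → List Char → List String
  | out, word, [] => pvEmit out word
  | out, word, c :: cs =>
    if c == '-' then pvScanB (pvEmit out word) [] cs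
    else pvScanB out (word ++ [if word.isEmpty then PySem.Chars.upperChar c else PySem.Chars.lowerChar c]) cs

def chipset_marketting_name_alt (chipset : String) : String :=
  PySem.Str.join " " (pvScanB [] [] chipset.toList)

-- ===== PRECONDITION & SPEC =====
def Spec_chipset_marketting_name (chipset : String) (out : String) : Prop := out = chipset_marketting_name_alt chipset
instance (chipset : String) (out : String) : Decidable (Spec_chipset_marketting_name chipset out) := by unfold Spec_chipset_marketting_name; infer_instance

-- ===== CLAIM (what is proved, stated in full; the proofs are below) =====
def Claim_equal_chipset_marketting_name : Prop := ∀ (chipset : String), Dom_chipset_marketting_name chipset → Spec_chipset_marketting_name chipset (chipset_marketting_name chipset)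

-- ===== LEMMAS AND PROOFS =====

-- ---- A-side: the loop + remove() passes equal one filter-and-map ----

-- a lookup for a key not in the table returns the default
theorem getD_repl_miss (w : String) (h3 : w ≠ "8gen3") (h2 : w ≠ "8gen2") (h1 : w ≠ "8gen1")
    (hs : w ≠ "Snapdragon") : PySem.Dict.getD pvRepl w w = w := by
  have hi : pvRepl.items = [("8gen3", "8 Gen 3"), ("8gen2", "8 Gen 2"), ("8gen1", "8 Gen 1"),
      ("Snapdragon", "Snapdragon®")] := by rfl
  have b3 : ("8gen3" == w) = false := by simp [Ne.symm h3]
  have b2 : ("8gen2" == w) = false := by simp [Ne.symm h2]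
  have b1 : ("8gen1" == w) = false := by simp [Ne.symm h1]
  have bs : ("Snapdragon" == w) = false := by simp [Ne.symm hs]
  simp [PySem.Dict.getD, PySem.Dict.get?, hi, List.find?, b3, b2, b1, bs]

-- A's replacement chain agrees pointwise with B's table lookup
theorem stepA_fst_eq_getD (w : String) : (pvStepA w).1 = PySem.Dict.getD pvRepl w w := by
  by_cases h3 : w = "8gen3"; · subst h3; rfl
  by_cases h2 : w = "8gen2"; · subst h2; rfl
  by_cases h1 : w = "8gen1"; · subst h1; rfl
  by_cases hs : w = "Snapdragon"; · subst hs; rfl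
  rw [getD_repl_miss w h3 h2 h1 hs]
  by_cases hq : w = "Qualcomm"
  · subst hq; rfl
  · simp [pvStepA, h3, h2, h1, hs, hq]

theorem stepA_snd (w : String) :
    (pvStepA w).2 = if w = "Qualcomm" then some w else none := by
  by_cases h3 : w = "8gen3"; · subst h3; rfl
  by_cases h2 : w = "8gen2"; · subst h2; rfl
  by_cases h1 : w = "8gen1"; · subst h1; rfl
  by_cases hs : w = "Snapdragon"; · subst hs; rfl
  by_cases hq : w = "Qualcomm"
  · subst hq; rfl
  · simp [pvStepA, h3, h2, h1, hs, hq]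

theorem stepA_fst_ne (w : String) (h : w ≠ "Qualcomm") : (pvStepA w).1 ≠ "Qualcomm" := by
  by_cases h3 : w = "8gen3"; · subst h3; decide
  by_cases h2 : w = "8gen2"; · subst h2; decide
  by_cases h1 : w = "8gen1"; · subst h1; decide
  by_cases hs : w = "Snapdragon"; · subst hs; decide
  simp [pvStepA, h3, h2, h1, hs, h]

theorem pvLoopA_cons (w : String) (ws : List String) :
    pvLoopA (w :: ws) = ((pvStepA w).1 :: (pvLoopA ws).1,
      if w = "Qualcomm" then w :: (pvLoopA ws).2 else (pvLoopA ws).2) := by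
  by_cases hq : w = "Qualcomm" <;> simp [pvLoopA, stepA_snd, hq]

-- every collected detail is the literal "Qualcomm"
theorem loopA_details (ws : List String) : ∀ d ∈ (pvLoopA ws).2, d = "Qualcomm" := by
  induction ws with
  | nil => simp [pvLoopA]
  | cons w ws ih =>
    rw [pvLoopA_cons]
    by_cases hq : w = "Qualcomm"
    · subst hq; simp only [if_true]
      intro d hd
      rcases List.mem_cons.mp hd with h | h
      · exact h
      · exact ih d h
    · simp only [if_neg hq]; exact ih

-- pvRemove of an element different from the head commutes with cons
theorem pvRemove_cons_ne (a : String) (l : List String) (d : String) (h : d ≠ a) :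
    pvRemove (a :: l) d = a :: pvRemove l d := by
  unfold pvRemove
  rw [PySem.List.remove?_cons_of_ne l (show a ≠ d from fun e => h e.symm)]
  cases PySem.List.remove? l d <;> simp

theorem foldl_pvRemove_cons (a : String) (l : List String) (ds : List String)
    (h : ∀ d ∈ ds, d ≠ a) :
    ds.foldl pvRemove (a :: l) = a :: ds.foldl pvRemove l := by
  induction ds generalizing l with
  | nil => rfl
  | cons d ds ih =>
    simp only [List.foldl_cons]
    rw [pvRemove_cons_ne a l d (h d (by simp))]
    exact ih (pvRemove l d) (fun x hx => h x (by simp [hx]))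

-- main A-side invariant: A's loop followed by the removals is a filter-then-map
theorem loopA_remove_eq (ws : List String) :
    (pvLoopA ws).2.foldl pvRemove (pvLoopA ws).1 =
      (ws.filter (· != "Qualcomm")).map (fun w => PySem.Dict.getD pvRepl w w) := by
  induction ws with
  | nil => rfl
  | cons w ws ih =>
    rw [pvLoopA_cons]
    by_cases hq : w = "Qualcomm"
    · subst hq
      simp only [if_true, List.foldl_cons]
      have hstep : (pvStepA "Qualcomm").1 = "Qualcomm" := rfl
      rw [hstep]
      have hrm : pvRemove ("Qualcomm" :: (pvLoopA ws).1) "Qualcomm" = (pvLoopA ws).1 := by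
        simp [pvRemove, PySem.List.remove?_cons_self]
      rw [hrm, ih]
      simp
    · simp only [if_neg hq]
      rw [foldl_pvRemove_cons _ _ _
        (fun d hd => by rw [loopA_details ws d hd]; exact fun e => stepA_fst_ne w hq e.symm)]
      rw [ih, stepA_fst_eq_getD]
      have : (w != "Qualcomm") = true := by simp [hq]
      simp [this]

-- ---- the split: splitOn on the one-char separator '-' is this plain structural recursion ----
def mySplit : List Char → List Char → List (List Char)
  | cur, [] => [cur]
  | cur, c :: r => if c == '-' then cur :: mySplit [] r else mySplit (cur ++ [c]) r

theorem splitOn_go_dash (l : List Char) : ∀ (fuel : Nat), l.length < fuel →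
    ∀ (cur : List Char) (acc : List (List Char)),
    PySem.Chars.splitOn.go ['-'] fuel l cur acc = acc.reverse ++ mySplit cur.reverse l := by
  induction l with
  | nil =>
    intro fuel hf cur acc
    match fuel, hf with
    | fuel + 1, _ => simp [PySem.Chars.splitOn.go, mySplit]
  | cons c rest ih =>
    intro fuel hf cur acc
    match fuel, hf with
    | fuel + 1, hf =>
      have hrest : rest.length < fuel := by simpa using Nat.lt_of_succ_lt_succ hf
      by_cases hc : c = '-'
      · subst hc
        have hpre : (['-'].isPrefixOf ('-' :: rest)) = true := by simp [List.isPrefixOf]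
        simp only [PySem.Chars.splitOn.go, hpre, if_true, List.length_cons, List.length_nil,
          List.drop_succ_cons, List.drop_zero]
        rw [ih fuel hrest [] (cur.reverse :: acc)]
        simp [mySplit]
      · have hpre : (['-'].isPrefixOf (c :: rest)) = false := by
          simp only [List.isPrefixOf, Bool.and_eq_false_iff, beq_eq_false_iff_ne]
          exact Or.inl (Ne.symm hc)
        simp only [PySem.Chars.splitOn.go, hpre, Bool.false_eq_true, if_false]
        rw [ih fuel hrest (c :: cur) acc]
        simp [mySplit, hc]

theorem splitOn_dash (cs : List Char) :
    PySem.Chars.splitOn cs ['-'] = mySplit [] cs := by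
  have := splitOn_go_dash cs (cs.length + 1) (Nat.lt_succ_self _) [] []
  simpa [PySem.Chars.splitOn] using this

-- ---- B-side: the character scan equals split-capitalize-filter-map ----

theorem capChars_snoc (w : List Char) (c : Char) :
    capChars (w ++ [c]) =
      capChars w ++ [if w.isEmpty then PySem.Chars.upperChar c else PySem.Chars.lowerChar c] := by
  cases w <;> simp [capChars, PySem.Chars.lower]

-- one emitted word, as a (possibly empty) list
def pvEmitOne (word : List Char) : List String :=
  let w := String.ofList word
  if w == "Qualcomm" then [] else [PySem.Dict.getD pvRepl w w]

theorem pvEmit_eq (out : List String) (word : List Char) :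
    pvEmit out word = out ++ pvEmitOne word := by
  by_cases h : String.ofList word = "Qualcomm" <;> simp [pvEmit, pvEmitOne, h]

theorem capChars_isEmpty (w : List Char) : (capChars w).isEmpty = w.isEmpty := by
  cases w <;> rfl

-- scan invariant: the state's word is the capitalization of the raw word read so far
theorem pvScanB_eq (cs : List Char) : ∀ (w0 : List Char) (out : List String),
    pvScanB out (capChars w0) cs =
      out ++ (mySplit w0 cs).flatMap (fun t => pvEmitOne (capChars t)) := by
  induction cs with
  | nil => intro w0 out; simp [pvScanB, mySplit, pvEmit_eq]
  | cons c r ih =>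
    intro w0 out
    by_cases hc : c = '-'
    · subst hc
      have h0 : capChars ([] : List Char) = [] := rfl
      simp only [pvScanB, beq_self_eq_true, if_true, pvEmit_eq]
      rw [← h0, ih [] (out ++ pvEmitOne (capChars w0))]
      simp [mySplit]
    · have hb : (c == '-') = false := by simp [hc]
      simp only [pvScanB, hb, Bool.false_eq_true, if_false, capChars_isEmpty]
      rw [← capChars_snoc, ih (w0 ++ [c]) out]
      simp [mySplit, hc]

-- flatMap of per-word emission is filter-then-map
theorem emitOne_flat (ts : List (List Char)) :
    ts.flatMap (fun t => pvEmitOne (capChars t)) =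
      ((ts.map (fun t => String.ofList (capChars t))).filter (· != "Qualcomm")).map
        (fun w => PySem.Dict.getD pvRepl w w) := by
  induction ts with
  | nil => rfl
  | cons t ts ih =>
    simp only [List.flatMap_cons, List.map_cons, List.filter_cons]
    by_cases hq : String.ofList (capChars t) = "Qualcomm"
    · have h1 : pvEmitOne (capChars t) = [] := by simp [pvEmitOne, hq]
      have hb : (String.ofList (capChars t) != "Qualcomm") = false := by simp [hq]
      rw [h1, hb]
      simpa using ih
    · have h1 : pvEmitOne (capChars t) =
          [PySem.Dict.getD pvRepl (String.ofList (capChars t)) (String.ofList (capChars t))] := by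
        simp [pvEmitOne, hq]
      have hb : (String.ofList (capChars t) != "Qualcomm") = true := by simp [hq]
      rw [h1, hb]
      simp [ih]

-- ===== VERDICT (by name: the statement is the Claim_ definition above) =====
theorem chipset_marketting_name_spec : Claim_equal_chipset_marketting_name := by
  intro chipset _
  unfold Spec_chipset_marketting_name chipset_marketting_name chipset_marketting_name_alt
  have hsplit : (PySem.Str.split? chipset "-").getD [] =
      (mySplit [] chipset.toList).map String.ofList := by
    simp [PySem.Str.split?, PySem.Chars.split?, splitOn_dash]
  have h0 : capChars ([] : List Char) = [] := rfl
  have hB : pvScanB [] [] chipset.toList =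
      (mySplit [] chipset.toList).flatMap (fun t => pvEmitOne (capChars t)) := by
    rw [← h0, pvScanB_eq chipset.toList [] []]
    rw [h0]
    simp
  rw [hsplit]
  simp only [loopA_remove_eq]
  rw [hB, emitOne_flat]
  simp [Function.comp_def, pyCapitalize, String.toList_ofList]
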